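-- pv_equiv track=rewrite | github.com/miliar/Code_Jam_Webscraper | solutions_python/solutions_year10_round2_nr1/450.py | pathTolist
-- ===== SOURCE A (Python) =====
-- def pathTolist(path):
--     folderList = path.split('/')
--     folderList = folderList[1:]
--     result = []
--     i = 0
--
--     for folder in folderList :
--         result.append(('/' + '/'.join(folderList[:i]),folder))
--         i += 1
--
--     return result
-- ===== SOURCE B (Python) =====
-- def _go(prefix, segs):
--     if not segs:
--         return []
--     return [(prefix, segs[0])] + _go(prefix + '/' + segs[0], segs[1:])
--
-- def pathTolist(path):
--     segs = path.split('/')[1:]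
--     if not segs:
--         return []
--     return [('/', segs[0])] + _go('/' + segs[0], segs[1:])
-- ===== Notes on version B (the rewrite author's own statement) =====
-- stated objective: alternative
-- what changed: Replaces the per-iteration join of the slice of all preceding folders with a recursion that threads the running parent-path prefix through the traversal, extending it by one segment per step instead of re-joining the slice from scratch.
import Mathlib
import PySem

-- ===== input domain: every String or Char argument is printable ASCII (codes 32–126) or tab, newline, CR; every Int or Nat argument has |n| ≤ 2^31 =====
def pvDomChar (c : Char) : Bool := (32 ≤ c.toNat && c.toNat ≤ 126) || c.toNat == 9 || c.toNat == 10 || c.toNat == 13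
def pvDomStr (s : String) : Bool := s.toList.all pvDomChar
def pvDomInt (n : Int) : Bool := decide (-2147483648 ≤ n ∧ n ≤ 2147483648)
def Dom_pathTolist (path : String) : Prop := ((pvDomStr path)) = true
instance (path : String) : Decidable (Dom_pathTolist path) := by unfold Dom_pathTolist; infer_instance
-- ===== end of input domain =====

-- B replaces the per-iteration re-join of folderList[:i] by a recursion that threads the
-- running prefix string through the traversal (objective: alternative decomposition).

-- ===== PORT A =====
-- for folder in folderList: result.append(('/' + '/'.join(folderList[:i]), folder)); i += 1
def pathTolist (path : String) : List (String × String) :=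
  let folderList := (PySem.Str.split? path "/").getD []   -- sep "/" ≠ "": split? is always `some`
  let folderList := PySem.List.slice folderList (some 1) none
  (folderList.foldl
    (fun (st : List (String × String) × Int) folder =>
      (st.1 ++ [("/" ++ PySem.Str.join "/" (PySem.List.slice folderList none (some st.2)), folder)],
       st.2 + 1))
    ([], 0)).1

-- ===== PORT B =====
-- def _go(prefix, segs): return [] if not segs else [(prefix, segs[0])] + _go(prefix+'/'+segs[0], segs[1:])
def pathTolistGo (pre : String) : List String → List (String × String)
  | [] => []
  | s :: rest => (pre, s) :: pathTolistGo (pre ++ "/" ++ s) rest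

def pathTolist_alt (path : String) : List (String × String) :=
  let segs := PySem.List.slice ((PySem.Str.split? path "/").getD []) (some 1) none
  match segs with
  | [] => []
  | s :: rest => ("/", s) :: pathTolistGo ("/" ++ s) rest

-- ===== PRECONDITION & SPEC =====
def Spec_pathTolist (path : String) (out : List (String × String)) : Prop := out = pathTolist_alt path
instance (path : String) (out : List (String × String)) : Decidable (Spec_pathTolist path out) := by unfold Spec_pathTolist; infer_instance

-- ===== CLAIM (what is proved, stated in full; the proofs are below) =====
def Claim_equal_pathTolist : Prop := ∀ (path : String), Dom_pathTolist path → Spec_pathTolist path (pathTolist path)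

-- ===== LEMMAS AND PROOFS =====

-- '/'.join(xs + [y]) = '/'.join(xs) + '/' + y when xs ≠ [] (Chars level)
theorem charsJoin_append_singleton (sep y : List Char) :
    ∀ (xs : List (List Char)), xs ≠ [] →
      PySem.Chars.join sep (xs ++ [y]) = PySem.Chars.join sep xs ++ sep ++ y := by
  intro xs
  induction xs with
  | nil => intro h; exact absurd rfl h
  | cons a t ih =>
    intro _
    cases t with
    | nil => simp [PySem.Chars.join_cons_cons, PySem.Chars.join_singleton]
    | cons b t' =>
      have h := ih (by simp)
      rw [List.cons_append] at h
      rw [List.cons_append, List.cons_append, PySem.Chars.join_cons_cons, h,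
        PySem.Chars.join_cons_cons]
      simp [List.append_assoc]

-- the same fact on Strings
theorem strJoin_append_singleton (xs : List String) (y : String) (h : xs ≠ []) :
    PySem.Str.join "/" (xs ++ [y]) = PySem.Str.join "/" xs ++ "/" ++ y := by
  apply String.toList_inj.mp
  simp only [PySem.Str.toList_join, String.toList_append, List.map_append, List.map_cons,
    List.map_nil]
  exact charsJoin_append_singleton _ _ _ (by simpa using h)

-- A's loop, peeled off the state tuple: spine g i l lists (g (i+j), l[j])
def pvSpine (g : Int → String) : Int → List String → List (String × String)
  | _, [] => []
  | i, f :: rest => (g i, f) :: pvSpine g (i + 1) rest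

theorem foldl_eq_spine (g : Int → String) :
    ∀ (l : List String) (acc : List (String × String)) (i : Int),
      (l.foldl (fun (st : List (String × String) × Int) folder =>
        (st.1 ++ [(g st.2, folder)], st.2 + 1)) (acc, i)).1 = acc ++ pvSpine g i l := by
  intro l
  induction l with
  | nil => intro acc i; simp [pvSpine]
  | cons f rest ih =>
    intro acc i
    simp only [List.foldl_cons, pvSpine, ih, List.append_assoc, List.singleton_append]

-- invariant: once at least one segment is done, A's re-joined slice equals B's running prefix
theorem spine_eq_go :
    ∀ (rest done full : List String), full = done ++ rest → done ≠ [] →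
      pvSpine (fun i => "/" ++ PySem.Str.join "/" (PySem.List.slice full none (some i)))
        (done.length : Int) rest
      = pathTolistGo ("/" ++ PySem.Str.join "/" done) rest := by
  intro rest
  induction rest with
  | nil => intro done full _ _; simp [pvSpine, pathTolistGo]
  | cons f rs ih =>
    intro done full hfull hne
    simp only [pvSpine, pathTolistGo]
    have hslice : PySem.List.slice full none (some (done.length : Int)) = done := by
      rw [PySem.List.slice_to_natCast, hfull, List.take_left]
    refine congrArg₂ _ (by rw [hslice]) ?_
    have h1 : ((done.length : Int) + 1) = ((done ++ [f]).length : Int) := by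
      simp
    rw [h1, ih (done ++ [f]) full (by simp [hfull]) (by simp),
      strJoin_append_singleton done f hne]
    simp [String.append_assoc]

-- the whole equivalence, stated over an arbitrary segment list
theorem core_eq (segs : List String) :
    (segs.foldl
      (fun (st : List (String × String) × Int) folder =>
        (st.1 ++ [("/" ++ PySem.Str.join "/" (PySem.List.slice segs none (some st.2)), folder)],
         st.2 + 1))
      ([], 0)).1
    = match segs with
      | [] => []
      | s :: rest => ("/", s) :: pathTolistGo ("/" ++ s) rest := by
  cases segs with
  | nil => simp
  | cons s rest =>
    have h := foldl_eq_spine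
      (fun i => "/" ++ PySem.Str.join "/" (PySem.List.slice (s :: rest) none (some i)))
      (s :: rest) [] 0
    simp only [List.nil_append] at h
    rw [h]
    simp only [pvSpine]
    have h0 : PySem.List.slice (s :: rest) none (some (0 : Int)) = [] := by
      simpa using PySem.List.slice_to_natCast (s :: rest) 0
    rw [h0]
    refine congrArg₂ _ (by simp [PySem.Str.join, PySem.Chars.join_nil]) ?_
    have := spine_eq_go rest [s] (s :: rest) (by simp) (by simp)
    simpa [PySem.Str.join, PySem.Chars.join_singleton] using this

-- ===== VERDICT (by name: the statement is the Claim_ definition above) =====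
theorem pathTolist_spec : Claim_equal_pathTolist := by
  intro path _
  unfold Spec_pathTolist pathTolist pathTolist_alt
  exact core_eq _
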